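-- pv_equiv track=rewrite | github.com/davidpaulius/foon_to_pddl | FOON_to_PDDL.py | _reviseObjectLabels
-- ===== SOURCE A (Python) =====
-- def _reviseObjectLabels(S):
--     chars_to_remove = ['{}', '{', ',', '}', ' ', '-']
--     string = S
--     for C in chars_to_remove:
--         if C == '{}' or C == '}':
--             string = string.replace(C, '')
--         else:
--             string = string.replace(C, '_')
--
--     return string
-- ===== SOURCE B (Python) =====
-- def _reviseObjectLabels(S):
--     # single fused left-to-right scan: an adjacent '{}' pair is dropped as a unit
--     # (= leftmost non-overlapping removal), every other special char is mapped inline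
--     out = []
--     i, n = 0, len(S)
--     while i < n:
--         c = S[i]
--         if c == '{' and i + 1 < n and S[i + 1] == '}':
--             i += 2
--         elif c == '}':
--             i += 1
--         elif c in ('{', ',', ' ', '-'):
--             out.append('_')
--             i += 1
--         else:
--             out.append(c)
--             i += 1
--     return ''.join(out)
-- ===== Notes on version B (the rewrite author's own statement) =====
-- stated objective: alternative
-- what changed: Replaces A's six sequential full-string replace passes by one fused left-to-right scan with an explicit index and output accumulator that drops an adjacent '{}' pair as a unit and translates each remaining special character inline.
import Mathlib
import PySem

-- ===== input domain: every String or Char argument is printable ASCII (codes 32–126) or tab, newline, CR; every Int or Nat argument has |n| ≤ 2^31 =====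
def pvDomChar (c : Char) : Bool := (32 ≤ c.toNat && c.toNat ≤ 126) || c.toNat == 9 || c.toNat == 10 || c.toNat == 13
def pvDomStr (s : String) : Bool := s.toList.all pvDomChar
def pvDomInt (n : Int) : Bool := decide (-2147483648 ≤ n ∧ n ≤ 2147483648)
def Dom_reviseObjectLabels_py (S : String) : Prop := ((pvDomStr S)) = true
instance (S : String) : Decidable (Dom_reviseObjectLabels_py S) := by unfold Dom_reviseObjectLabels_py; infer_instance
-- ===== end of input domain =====

-- B replaces A's six sequential full-string replace passes by one fused left-to-right
-- scan that drops an adjacent '{}' pair as a unit and maps each remaining special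
-- character inline (alternative decomposition, same result).

-- ===== PORT A =====
-- A: fold over the literal list, replacing '{}' and '}' by '' and the others by '_'
def reviseObjectLabels_py (S : String) : String :=
  (["{}", "{", ",", "}", " ", "-"]).foldl
    (fun string C =>
      if C == "{}" || C == "}" then PySem.Str.replace string C ""
      else PySem.Str.replace string C "_") S

-- ===== PORT B =====
-- B: the fused single scan from Source B; the index+lookahead while-loop becomes
-- length-decreasing recursion on the character list (t.head? is the S[i+1] lookahead)
def altGo : List Char → List Char
  | [] => []
  | c :: t =>
      if c = '{' ∧ t.head? = some '}' then altGo t.tail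
      else if c = '}' then altGo t
      else if c = '{' ∨ c = ',' ∨ c = ' ' ∨ c = '-' then '_' :: altGo t
      else c :: altGo t
termination_by l => l.length
decreasing_by all_goals (simp [List.length_tail]; try omega)

def reviseObjectLabels_py_alt (S : String) : String :=
  String.ofList (altGo S.toList)

-- ===== PRECONDITION & SPEC =====
def Spec_reviseObjectLabels_py (S : String) (out : String) : Prop := out = reviseObjectLabels_py_alt S
instance (S : String) (out : String) : Decidable (Spec_reviseObjectLabels_py S out) := by unfold Spec_reviseObjectLabels_py; infer_instance

-- ===== CLAIM (what is proved, stated in full; the proofs are below) =====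
def Claim_equal_reviseObjectLabels_py : Prop := ∀ (S : String), Dom_reviseObjectLabels_py S → Spec_reviseObjectLabels_py S (reviseObjectLabels_py S)

-- ===== LEMMAS AND PROOFS =====

-- proof-side description of the '{}' removal pass (leftmost non-overlapping)
def rmPair : List Char → List Char
  | [] => []
  | c :: t =>
      if c = '{' ∧ t.head? = some '}' then rmPair t.tail
      else c :: rmPair t
termination_by l => l.length
decreasing_by all_goals (simp [List.length_tail]; try omega)

-- proof-side per-character translation (A's last five passes collapsed)
def pvTrans (c : Char) : Option Char :=
  if c = '{' then some '_'
  else if c = ',' then some '_'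
  else if c = '}' then none
  else if c = ' ' then some '_'
  else if c = '-' then some '_'
  else some c

-- replacing a single character c by r is a per-character flatMap
theorem replace_go_single (c : Char) (r : List Char) :
    ∀ (fuel : Nat) (l acc : List Char), l.length ≤ fuel →
      PySem.Chars.replace.go [c] r fuel l acc
        = acc.reverse ++ l.flatMap (fun x => if x = c then r else [x]) := by
  intro fuel
  induction fuel with
  | zero =>
    intro l acc h
    have : l = [] := List.eq_nil_of_length_eq_zero (Nat.le_zero.mp h)
    subst this
    simp [PySem.Chars.replace.go]
  | succ n ih =>
    intro l acc h
    cases l with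
    | nil => simp [PySem.Chars.replace.go]
    | cons x t =>
      by_cases hx : x = c
      · subst hx
        have hpre : List.isPrefixOf [x] (x :: t) = true := by
          simp [List.isPrefixOf]
        rw [PySem.Chars.replace.go]
        simp only [hpre, if_pos]
        rw [show List.drop [x].length (x :: t) = t from rfl]
        rw [ih t (r.reverse ++ acc) (by simpa using Nat.le_of_succ_le_succ h)]
        simp
      · have hpre : List.isPrefixOf [c] (x :: t) = false := by
          simp [List.isPrefixOf]
          exact fun h' => absurd h'.symm hx
        rw [PySem.Chars.replace.go]
        simp only [hpre, Bool.false_eq_true, if_neg, not_false_iff]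
        rw [ih t (x :: acc) (by simpa using Nat.le_of_succ_le_succ h)]
        simp [hx]

theorem replace_single (c : Char) (r : List Char) (l : List Char) :
    PySem.Chars.replace l [c] r = l.flatMap (fun x => if x = c then r else [x]) := by
  rw [PySem.Chars.replace]
  simp only [List.isEmpty_cons, Bool.false_eq_true, if_neg, not_false_iff]
  simpa using replace_go_single c r l.length l [] (le_refl _)

-- the '{}'-removal pass is rmPair
theorem replace_go_pair :
    ∀ (fuel : Nat) (l acc : List Char), l.length ≤ fuel →
      PySem.Chars.replace.go ['{', '}'] [] fuel l acc = acc.reverse ++ rmPair l := by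
  intro fuel
  induction fuel using Nat.strong_induction_on with
  | _ fuel ih =>
    intro l acc h
    match fuel, l with
    | 0, l =>
      have : l = [] := List.eq_nil_of_length_eq_zero (Nat.le_zero.mp h)
      subst this
      simp [PySem.Chars.replace.go, rmPair]
    | (n+1), [] => simp [PySem.Chars.replace.go, rmPair]
    | (n+1), (x :: t) =>
      by_cases hp : x = '{' ∧ t.head? = some '}'
      · obtain ⟨hx, hh⟩ := hp
        subst hx
        obtain ⟨t', ht⟩ : ∃ t', t = '}' :: t' := by
          cases t with
          | nil => simp at hh
          | cons y t' => simp at hh; exact ⟨t', by rw [hh]⟩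
        subst ht
        have hpre : List.isPrefixOf ['{', '}'] ('{' :: '}' :: t') = true := by
          simp [List.isPrefixOf]
        rw [PySem.Chars.replace.go]
        simp only [hpre, if_pos]
        rw [show List.drop (['{','}'].length) ('{' :: '}' :: t') = t' from rfl]
        rw [ih n (Nat.lt_succ_self n) t' (List.reverse [] ++ acc)
          (by simp at h; omega)]
        rw [rmPair]
        simp
      · have hpre : List.isPrefixOf ['{', '}'] (x :: t) = false := by
          cases t with
          | nil => simp [List.isPrefixOf]
          | cons y t' =>
            simp only [List.isPrefixOf, Bool.and_eq_false_iff, beq_eq_false_iff_ne, ne_eq]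
            by_cases hx : x = '{'
            · by_cases hy : y = '}'
              · exact absurd ⟨hx, by simp [hy]⟩ hp
              · right; left; exact fun h' => hy h'.symm
            · left; exact fun h' => hx h'.symm
        rw [PySem.Chars.replace.go]
        simp only [hpre, Bool.false_eq_true, if_neg, not_false_iff]
        rw [ih n (Nat.lt_succ_self n) t (x :: acc) (by simpa using Nat.le_of_succ_le_succ h)]
        rw [rmPair, if_neg hp]
        simp

theorem replace_pair (l : List Char) :
    PySem.Chars.replace l ['{', '}'] [] = rmPair l := by
  rw [PySem.Chars.replace]
  simp only [List.isEmpty_cons, Bool.false_eq_true, if_neg, not_false_iff]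
  simpa using replace_go_pair l.length l [] (le_refl _)

-- the four single-character passes of A collapse into one filterMap
theorem chain_eq_filterMap (l : List Char) :
    ((((l.flatMap (fun x => if x = '{' then ['_'] else [x])).flatMap
        (fun x => if x = ',' then ['_'] else [x])).flatMap
        (fun x => if x = '}' then [] else [x])).flatMap
        (fun x => if x = ' ' then ['_'] else [x])).flatMap
        (fun x => if x = '-' then ['_'] else [x])
      = l.filterMap pvTrans := by
  induction l with
  | nil => simp
  | cons x t ih =>
    simp only [List.flatMap_cons, List.flatMap_append, List.filterMap_cons]
    rw [ih]
    by_cases h1 : x = '{'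
    · subst h1; simp [pvTrans]
    by_cases h2 : x = ','
    · subst h2; simp [pvTrans]
    by_cases h3 : x = '}'
    · subst h3; simp [pvTrans]
    by_cases h4 : x = ' '
    · subst h4; simp [pvTrans]
    by_cases h5 : x = '-'
    · subst h5; simp [pvTrans, h1, h2, h3, h4]
    · simp [pvTrans, h1, h2, h3, h4, h5]

-- B's fused scan = rmPair followed by the per-character translation
theorem altGo_eq : ∀ (n : Nat) (l : List Char), l.length ≤ n →
    altGo l = (rmPair l).filterMap pvTrans := by
  intro n
  induction n using Nat.strong_induction_on with
  | _ n ih =>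
    intro l h
    match n, l with
    | 0, l =>
      have : l = [] := List.eq_nil_of_length_eq_zero (Nat.le_zero.mp h)
      subst this
      simp [altGo, rmPair]
    | (m+1), [] => simp [altGo, rmPair]
    | (m+1), (c :: t) =>
      by_cases hp : c = '{' ∧ t.head? = some '}'
      · rw [altGo, if_pos hp, rmPair, if_pos hp]
        exact ih m (Nat.lt_succ_self m) t.tail
          (by simp at h ⊢; omega)
      · rw [altGo, if_neg hp, rmPair, if_neg hp]
        rw [List.filterMap_cons]
        rw [ih m (Nat.lt_succ_self m) t (by simpa using Nat.le_of_succ_le_succ h)]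
        by_cases h3 : c = '}'
        · subst h3; simp [pvTrans]
        by_cases h1 : c = '{'
        · subst h1; simp [pvTrans]
        by_cases h2 : c = ','
        · subst h2; simp [pvTrans, h1, h3]
        by_cases h4 : c = ' '
        · subst h4; simp [pvTrans, h1, h2, h3]
        by_cases h5 : c = '-'
        · subst h5; simp [pvTrans, h1, h2, h3, h4]
        · simp [pvTrans, h1, h2, h3, h4, h5]

-- ===== VERDICT (by name: the statement is the Claim_ definition above) =====
theorem reviseObjectLabels_py_spec : Claim_equal_reviseObjectLabels_py := by
  intro S _
  show reviseObjectLabels_py S = reviseObjectLabels_py_alt S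
  have hA : reviseObjectLabels_py S =
      PySem.Str.replace (PySem.Str.replace (PySem.Str.replace (PySem.Str.replace
        (PySem.Str.replace (PySem.Str.replace S "{}" "") "{" "_") "," "_") "}" "") " " "_") "-" "_" := rfl
  rw [hA]
  unfold reviseObjectLabels_py_alt
  unfold PySem.Str.replace
  simp only [String.toList_ofList]
  refine congrArg String.ofList ?_
  simp only [show ("{}" : String).toList = ['{', '}'] from rfl,
    show ("{" : String).toList = ['{'] from rfl,
    show ("," : String).toList = [','] from rfl,
    show ("}" : String).toList = ['}'] from rfl,
    show (" " : String).toList = [' '] from rfl,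
    show ("-" : String).toList = ['-'] from rfl,
    show ("_" : String).toList = ['_'] from rfl,
    show ("" : String).toList = [] from rfl]
  rw [replace_pair, replace_single, replace_single, replace_single, replace_single, replace_single]
  rw [chain_eq_filterMap]
  exact (altGo_eq _ _ (le_refl _)).symm
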